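-- pv_equiv track=rewrite | github.com/robinkashyap/CP-Coding | 2_Day_Array&2DArray/Conting1.py | counting1
-- ===== SOURCE A (Python) =====
-- def counting1(arr):
--     n = len(arr)
--     max_count = 0
--     count = 0
--     start_index = -1
--     end_index = -1
--     current_start = 0
--
--     for i in range(n):
--         if arr[i] == 1:
--             count += 1
--             if count == 1:
--                 current_start = i
--         else:
--             if count > max_count:
--                 max_count = count
--                 start_index = current_start
--                 end_index = i - 1
--             count = 0
--
--     # Check one last time in case the array ends with the longest sequence of 1s
--     if count > max_count:
--         max_count = count
--         start_index = current_start
--         end_index = n - 1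
--
--     return max_count, start_index, end_index
-- ===== SOURCE B (Python) =====
-- def counting1(arr):
--     # Phase 1: materialize every maximal run of 1s as (start, length).
--     runs = []
--     pos = 0
--     run = 0
--     for x in arr:
--         if x == 1:
--             run += 1
--         else:
--             if run != 0:
--                 runs.append((pos - run, run))
--             run = 0
--         pos += 1
--     if run != 0:
--         runs.append((pos - run, run))
--     # Phase 2: pick the earliest strictly-longest run.
--     best = (0, -1, -1)
--     for start, length in runs:
--         if length > best[0]:
--             best = (length, start, start + length - 1)
--     return best
-- ===== Notes on version B (the rewrite author's own statement) =====
-- stated objective: alternative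
-- what changed: B splits the computation into two phases: it first materializes the list of maximal runs of ones as (start,length) pairs, then reduces that list to the earliest strictly-longest run, instead of A's single inline pass that interleaves run tracking with best-so-far bookkeeping and a post-loop fixup.
import Mathlib
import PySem

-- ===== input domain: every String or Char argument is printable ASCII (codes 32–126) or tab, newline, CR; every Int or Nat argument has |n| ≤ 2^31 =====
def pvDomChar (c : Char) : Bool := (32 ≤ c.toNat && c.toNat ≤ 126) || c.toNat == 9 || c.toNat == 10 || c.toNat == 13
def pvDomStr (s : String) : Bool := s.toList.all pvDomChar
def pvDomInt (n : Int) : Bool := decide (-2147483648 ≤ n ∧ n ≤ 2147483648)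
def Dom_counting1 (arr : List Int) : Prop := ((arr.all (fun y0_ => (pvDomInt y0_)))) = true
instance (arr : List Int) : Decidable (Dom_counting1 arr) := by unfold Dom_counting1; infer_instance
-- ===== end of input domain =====

-- B replaces A's single interleaved pass by two phases (collect maximal runs, then reduce
-- to the earliest strictly-longest one); same cost, different decomposition ("alternative").

-- ===== PORT A =====
-- A's loop state: (count, max_count, start_index, end_index, current_start, i)
def counting1Step (st : Int × Int × Int × Int × Int × Int) (x : Int) :
    Int × Int × Int × Int × Int × Int :=
  match st with
  | (count, max_count, start_index, end_index, current_start, i) =>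
    if x = 1 then
      (count + 1, max_count, start_index, end_index,
       (if count + 1 = 1 then i else current_start), i + 1)
    else
      if count > max_count then
        (0, count, current_start, i - 1, current_start, i + 1)
      else
        (0, max_count, start_index, end_index, current_start, i + 1)

def counting1 (arr : List Int) : Int × Int × Int :=
  let n : Int := arr.length
  match arr.foldl counting1Step (0, 0, -1, -1, 0, 0) with
  | (count, max_count, start_index, end_index, current_start, _) =>
    if count > max_count then (count, current_start, n - 1)
    else (max_count, start_index, end_index)

-- ===== PORT B =====
-- Phase-1 loop state: (runs, pos, run)
def counting1AltRunStep (st : List (Int × Int) × Int × Int) (x : Int) :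
    List (Int × Int) × Int × Int :=
  match st with
  | (runs, pos, run) =>
    if x = 1 then (runs, pos + 1, run + 1)
    else if run ≠ 0 then (runs ++ [(pos - run, run)], pos + 1, 0)
    else (runs, pos + 1, 0)

-- Phase-2 reducer: earliest strictly-longest run
def counting1AltBest (b : Int × Int × Int) (r : Int × Int) : Int × Int × Int :=
  if r.2 > b.1 then (r.2, r.1, r.1 + r.2 - 1) else b

def counting1_alt (arr : List Int) : Int × Int × Int :=
  match arr.foldl counting1AltRunStep ([], 0, 0) with
  | (runs, pos, run) =>
    let runs := if run ≠ 0 then runs ++ [(pos - run, run)] else runs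
    runs.foldl counting1AltBest (0, -1, -1)

-- ===== PRECONDITION & SPEC =====
def Spec_counting1 (arr : List Int) (out : Int × Int × Int) : Prop := out = counting1_alt arr
instance (arr : List Int) (out : Int × Int × Int) : Decidable (Spec_counting1 arr out) := by unfold Spec_counting1; infer_instance

-- ===== CLAIM (what is proved, stated in full; the proofs are below) =====
def Claim_equal_counting1 : Prop := ∀ (arr : List Int), Dom_counting1 arr → Spec_counting1 arr (counting1 arr)

-- ===== LEMMAS AND PROOFS =====

-- A's finalization, phrased on the folded state (i is the final index, = n).
def counting1Fin (st : Int × Int × Int × Int × Int × Int) : Int × Int × Int :=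
  match st with
  | (count, max_count, start_index, end_index, current_start, _) =>
    if count > max_count then (count, current_start, st.2.2.2.2.2 - 1)
    else (max_count, start_index, end_index)

-- B's finalization on the phase-1 state.
def counting1AltFin (st : List (Int × Int) × Int × Int) : Int × Int × Int :=
  match st with
  | (runs, pos, run) =>
    (if run ≠ 0 then runs ++ [(pos - run, run)] else runs).foldl counting1AltBest (0, -1, -1)

-- the index component of A's fold advances by the length of the input
lemma counting1_i_comp : ∀ (arr : List Int) (c mc si ei cs i : Int),
    (arr.foldl counting1Step (c, mc, si, ei, cs, i)).2.2.2.2.2 = i + arr.length := by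
  intro arr
  induction arr with
  | nil => intro c mc si ei cs i; simp
  | cons x xs ih =>
    intro c mc si ei cs i
    simp only [List.foldl_cons, counting1Step]
    split_ifs <;> rw [ih] <;> simp <;> omega

-- the core invariant: A's running best equals the reduction of B's runs-so-far
lemma counting1_main : ∀ (arr : List Int) (c mc si ei cs pos : Int) (runs : List (Int × Int)),
    0 ≤ mc → 0 ≤ c → (c ≠ 0 → cs = pos - c) →
    (mc, si, ei) = runs.foldl counting1AltBest (0, -1, -1) →
    counting1Fin (arr.foldl counting1Step (c, mc, si, ei, cs, pos)) =
      counting1AltFin (arr.foldl counting1AltRunStep (runs, pos, c)) := by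
  intro arr
  induction arr with
  | nil =>
    intro c mc si ei cs pos runs hmc hc hcs hfold
    simp only [List.foldl_nil, counting1Fin, counting1AltFin]
    by_cases h : c = 0
    · subst h
      simp only [ne_eq, not_true_eq_false, ite_false]
      rw [← hfold]
      have : ¬ ((0:Int) > mc) := by omega
      simp [this]
    · simp only [ne_eq, h, not_false_eq_true, if_pos]
      rw [List.foldl_append, ← hfold]
      simp only [List.foldl_cons, List.foldl_nil, counting1AltBest]
      have hcs' := hcs h
      by_cases hgt : c > mc
      · simp only [hgt, if_pos]
        refine congrArg₂ Prod.mk rfl (congrArg₂ Prod.mk hcs' ?_)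
        omega
      · have hng : ¬ ((pos - c, c).2 > (mc, si, ei).1) := hgt
        simp [hng]
  | cons x xs ih =>
    intro c mc si ei cs pos runs hmc hc hcs hfold
    simp only [List.foldl_cons, counting1Step, counting1AltRunStep]
    by_cases hx : x = 1
    · simp only [hx, if_pos]
      by_cases h0 : c = 0
      · subst h0
        simp only [zero_add, if_pos]
        exact ih 1 mc si ei pos (pos + 1) runs hmc (by omega) (by intro _; omega) hfold
      · have : ¬ (c + 1 = 1) := by omega
        simp only [this, ite_false]
        refine ih (c+1) mc si ei cs (pos+1) runs hmc (by omega) (fun _ => ?_) hfold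
        have := hcs h0; omega
    · simp only [hx, ite_false, ne_eq]
      by_cases h0 : c = 0
      · subst h0
        have hng : ¬ ((0:Int) > mc) := by omega
        simp only [hng, ite_false, not_true_eq_false]
        exact ih 0 mc si ei cs (pos+1) runs hmc le_rfl (by simp) hfold
      · have hcs' := hcs h0
        simp only [h0, not_false_eq_true, if_pos]
        by_cases hgt : c > mc
        · simp only [hgt, if_pos]
          refine ih 0 c cs (pos - 1) cs (pos+1) (runs ++ [(pos - c, c)]) (by omega) le_rfl (by simp) ?_
          rw [List.foldl_append, ← hfold]
          simp only [List.foldl_cons, List.foldl_nil, counting1AltBest]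
          have : (pos - c, c).2 > (mc, si, ei).1 := hgt
          simp only [this, if_pos]
          exact congrArg₂ Prod.mk rfl (congrArg₂ Prod.mk hcs' (by omega))
        · simp only [hgt, ite_false]
          refine ih 0 mc si ei cs (pos+1) (runs ++ [(pos - c, c)]) hmc le_rfl (by simp) ?_
          rw [List.foldl_append, ← hfold]
          simp only [List.foldl_cons, List.foldl_nil, counting1AltBest]
          have : ¬ ((pos - c, c).2 > (mc, si, ei).1) := hgt
          simp [this]

-- ===== VERDICT (by name: the statement is the Claim_ definition above) =====
theorem counting1_spec : Claim_equal_counting1 := by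
  intro arr _
  unfold Spec_counting1 counting1 counting1_alt
  have hmain := counting1_main arr 0 0 (-1) (-1) 0 0 [] le_rfl le_rfl (by simp) (by simp)
  have hi := counting1_i_comp arr 0 0 (-1) (-1) 0 0
  unfold counting1Fin counting1AltFin at hmain
  revert hmain hi
  rcases h : arr.foldl counting1Step (0, 0, -1, -1, 0, 0) with ⟨c, mc, si, ei, cs, i⟩
  rcases h2 : arr.foldl counting1AltRunStep ([], 0, 0) with ⟨runs, pos, run⟩
  intro hmain hi
  have hi' : i = (arr.length : Int) := by simpa using hi
  
  simp only at hmain ⊢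
  rw [hi'] at hmain
  simpa using hmain
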